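-- pv_equiv track=rewrite | github.com/pipolinlab/ExplorePipolin | explore_pipolin/download_taxon_accessions.py | create_acc_version_dict
-- ===== SOURCE A (Python) =====
-- from typing import Mapping
--
-- def create_acc_version_dict(json_data) -> Mapping[str, str]:
--     acc_version_dict = {}
--     for assembly in json_data:
--         acc = assembly['accession']
--         version = assembly['version']
--         if acc in acc_version_dict:
--             if acc_version_dict[acc] < version:
--                 acc_version_dict[acc] = version
--         else:
--             acc_version_dict[acc] = version
--     return acc_version_dict
-- ===== SOURCE B (Python) =====
-- def create_acc_version_dict(json_data):
--     groups = {}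
--     for assembly in json_data:
--         groups.setdefault(assembly['accession'], []).append(assembly['version'])
--     return {acc: max(versions) for acc, versions in groups.items()}
-- ===== Notes on version B (the rewrite author's own statement) =====
-- stated objective: alternative
-- what changed: A streams a single fold keeping a running max per accession; B first groups all version strings per accession (setdefault+append, preserving first-occurrence key order) and then takes max() of each group in a dict comprehension.
import Mathlib
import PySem

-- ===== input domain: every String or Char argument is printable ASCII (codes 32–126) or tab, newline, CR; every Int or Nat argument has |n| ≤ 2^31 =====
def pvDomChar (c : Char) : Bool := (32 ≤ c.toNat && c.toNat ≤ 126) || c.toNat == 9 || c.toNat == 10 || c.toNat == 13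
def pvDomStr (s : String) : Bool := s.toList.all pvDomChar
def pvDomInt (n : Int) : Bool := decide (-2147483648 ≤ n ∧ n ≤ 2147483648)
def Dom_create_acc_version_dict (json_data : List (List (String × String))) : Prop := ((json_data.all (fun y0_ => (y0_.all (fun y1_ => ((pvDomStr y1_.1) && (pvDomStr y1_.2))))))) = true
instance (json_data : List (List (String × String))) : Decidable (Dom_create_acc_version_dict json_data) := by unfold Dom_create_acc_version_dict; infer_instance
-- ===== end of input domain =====

-- B groups all versions per accession first, then takes the max of each group;
-- A keeps a running max in a single pass. Same return value; objective: alternative decomposition.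

-- ===== PORT A =====
-- one iteration of A's loop body (acc/version lookups are exact under Pre_, which rules out KeyError)
def pvStepA (acc_version_dict : PySem.Dict String String) (assembly : List (String × String)) :
    PySem.Dict String String :=
  let acc : String := ((PySem.Dict.mk assembly).get? "accession").getD ""
  let version : String := ((PySem.Dict.mk assembly).get? "version").getD ""
  if acc_version_dict.contains acc then
    if acc_version_dict.getD acc "" < version then acc_version_dict.insert acc version
    else acc_version_dict
  else acc_version_dict.insert acc version

def create_acc_version_dict (json_data : List (List (String × String))) : List (String × String) :=
  (json_data.foldl pvStepA PySem.Dict.empty).items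

-- ===== PORT B =====
-- one iteration of B's grouping loop: groups.setdefault(acc, []).append(version)
def pvStepB (groups : PySem.Dict String (List String)) (assembly : List (String × String)) :
    PySem.Dict String (List String) :=
  groups.modify (((PySem.Dict.mk assembly).get? "accession").getD "") []
    (· ++ [((PySem.Dict.mk assembly).get? "version").getD ""])

def create_acc_version_dict_alt (json_data : List (List (String × String))) : List (String × String) :=
  ((json_data.foldl pvStepB PySem.Dict.empty).items).map
    (fun p => (p.1, PySem.List.maxD p.2 id ""))

-- ===== PRECONDITION & SPEC =====
-- Pre_ excludes exactly the inputs on which Python A raises KeyError: an assembly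
-- missing the 'accession' or 'version' key (B raises there too).
def Pre_create_acc_version_dict (json_data : List (List (String × String))) : Prop :=
  (json_data.all (fun assembly =>
    (PySem.Dict.mk assembly).contains "accession" && (PySem.Dict.mk assembly).contains "version")) = true
instance (json_data : List (List (String × String))) : Decidable (Pre_create_acc_version_dict json_data) := by
  unfold Pre_create_acc_version_dict; infer_instance

def pvWitness_create_acc_version_dict : (List (List (String × String))) :=
  [[("accession", "GCA_1"), ("version", "1")], [("accession", "GCA_1"), ("version", "2")]]

def Spec_create_acc_version_dict (json_data : List (List (String × String))) (out : List (String × String)) : Prop := out = create_acc_version_dict_alt json_data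
instance (json_data : List (List (String × String))) (out : List (String × String)) : Decidable (Spec_create_acc_version_dict json_data out) := by unfold Spec_create_acc_version_dict; infer_instance

-- ===== CLAIM (what is proved, stated in full; the proofs are below) =====
def Claim_equal_create_acc_version_dict : Prop := ∀ (json_data : List (List (String × String))), Dom_create_acc_version_dict json_data → Pre_create_acc_version_dict json_data → Spec_create_acc_version_dict json_data (create_acc_version_dict json_data)

-- ===== LEMMAS AND PROOFS =====

-- relate per-group value lists to A's running max
def pvProj (p : String × List String) : String × String := (p.1, PySem.List.maxD p.2 id "")

-- Python's builtin max as a binary fold step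
theorem pv_max?_cons_foldl (a : String) (t : List String) :
    PySem.List.max? (a :: t) id = some (t.foldl (fun m x => if m < x then x else m) a) := by
  show List.foldl _ (some a) t = _
  induction t generalizing a with
  | nil => rfl
  | cons b t ih =>
      show List.foldl _ (if id a < id b then some b else some a) t = _
      simp only [id_eq, List.foldl_cons]
      by_cases h : a < b
      · rw [if_pos h, if_pos h]; exact ih b
      · rw [if_neg h, if_neg h]; exact ih a

theorem pv_maxD_singleton (v : String) : PySem.List.maxD [v] id "" = v := rfl

theorem pv_maxD_append (vs : List String) (hvs : vs ≠ []) (v : String) :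
    PySem.List.maxD (vs ++ [v]) id "" =
      if PySem.List.maxD vs id "" < v then v else PySem.List.maxD vs id "" := by
  obtain ⟨a, t, rfl⟩ := List.exists_cons_of_ne_nil hvs
  simp only [PySem.List.maxD, List.cons_append, pv_max?_cons_foldl, List.foldl_append,
    List.foldl_cons, List.foldl_nil, Option.getD_some]

theorem pv_nodup_key_eq {l : List (String × List String)} (hnd : (l.map (·.1)).Nodup)
    {k : String} {x y : List String} (hx : (k, x) ∈ l) (hy : (k, y) ∈ l) : x = y := by
  induction l with
  | nil => cases hx
  | cons p t ih =>
      simp only [List.map_cons, List.nodup_cons] at hnd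
      rcases List.mem_cons.1 hx with h1 | h1 <;> rcases List.mem_cons.1 hy with h2 | h2
      · exact congrArg Prod.snd (h1.trans h2.symm)
      · exact absurd (List.mem_map.2 ⟨_, h2, by rw [← h1]⟩) hnd.1
      · exact absurd (List.mem_map.2 ⟨_, h1, by rw [← h2]⟩) hnd.1
      · exact ih hnd.2 h1 h2

theorem pv_get?_rel (dA : PySem.Dict String String) (dG : PySem.Dict String (List String))
    (h : dA.items = dG.items.map pvProj) (k : String) :
    dA.get? k = (dG.get? k).map (fun vs => PySem.List.maxD vs id "") := by
  simp only [PySem.Dict.get?, h, List.find?_map, Option.map_map]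
  rfl

theorem pv_contains_rel (dA : PySem.Dict String String) (dG : PySem.Dict String (List String))
    (h : dA.items = dG.items.map pvProj) (k : String) :
    dA.contains k = dG.contains k := by
  simp only [PySem.Dict.contains, h, List.any_map]
  rfl

theorem pv_not_mem_keys_of_not_contains {ν : Type} (d : PySem.Dict String ν) (a : String)
    (hc : d.contains a = false) : a ∉ d.items.map (·.1) := by
  intro hmem
  obtain ⟨p, hp, hpa⟩ := List.mem_map.1 hmem
  have hcon : d.contains a = true := by
    simp only [PySem.Dict.contains, List.any_eq_true]
    exact ⟨p, hp, by simp [hpa]⟩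
  simp [hcon] at hc

-- one loop iteration preserves the invariant
theorem pv_step (dA : PySem.Dict String String) (dG : PySem.Dict String (List String))
    (a v : String)
    (h : dA.items = dG.items.map pvProj)
    (hnd : (dG.items.map (·.1)).Nodup)
    (hne : ∀ p ∈ dG.items, p.2 ≠ ([] : List String)) :
    (let dA' := if dA.contains a then
        (if dA.getD a "" < v then dA.insert a v else dA) else dA.insert a v
     let dG' := dG.modify a [] (· ++ [v])
     dA'.items = dG'.items.map pvProj ∧ (dG'.items.map (·.1)).Nodup ∧
       ∀ p ∈ dG'.items, p.2 ≠ ([] : List String)) := by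
  simp only [PySem.Dict.modify]
  by_cases hc : dG.contains a = true
  · -- existing key: B appends to the group, A compares with the running max
    obtain ⟨vs, hg⟩ : ∃ vs, dG.get? a = some vs := by
      have := (PySem.Dict.contains_eq_isSome_get? (d := dG) (k := a)).symm.trans hc
      exact Option.isSome_iff_exists.1 this
    have hmem : (a, vs) ∈ dG.items := PySem.Dict.mem_items_of_get?_eq_some dG hg
    have hvs : vs ≠ [] := hne _ hmem
    have hcA : dA.contains a = true := (pv_contains_rel dA dG h a).trans hc
    have hDA : dA.getD a "" = PySem.List.maxD vs id "" := by
      simp [PySem.Dict.getD, pv_get?_rel dA dG h a, hg]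
    have hDG : dG.getD a [] = vs := by simp [PySem.Dict.getD, hg]
    have hGitems : (dG.insert a (dG.getD a [] ++ [v])).items =
        dG.items.map (fun p => if p.1 == a then (a, vs ++ [v]) else p) := by
      rw [PySem.Dict.items_insert_of_contains dG (dG.getD a [] ++ [v]) hc, hDG]
    have hkey : ∀ p ∈ dG.items, (p.1 == a) = true → p.2 = vs := by
      intro p hp hpa
      have hpa' : p.1 = a := by simpa using hpa
      have hp' : (a, p.2) ∈ dG.items := by rw [← hpa']; exact hp
      exact pv_nodup_key_eq hnd hp' hmem
    refine ⟨?_, ?_, ?_⟩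
    · rw [if_pos hcA, hDA]
      by_cases hlt : PySem.List.maxD vs id "" < v
      · rw [if_pos hlt, PySem.Dict.items_insert_of_contains dA v hcA, hGitems, h,
          List.map_map, List.map_map]
        refine List.map_congr_left (fun p hp => ?_)
        by_cases hpa : (p.1 == a) = true
        · have h2 := hkey p hp hpa
          simp [pvProj, Function.comp, hpa, h2, pv_maxD_append vs hvs v, hlt]
        · simp [pvProj, Function.comp, hpa]
      · rw [if_neg hlt, hGitems, h, List.map_map]
        refine List.map_congr_left (fun p hp => ?_)
        by_cases hpa : (p.1 == a) = true
        · have h2 := hkey p hp hpa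
          have hpa' : p.1 = a := by simpa using hpa
          simp only [Function.comp_apply, hpa, if_true, pvProj]
          rw [hpa', h2, pv_maxD_append vs hvs v, if_neg hlt]
        · simp [pvProj, Function.comp, hpa]
    · rw [hGitems, List.map_map]
      have : (dG.items.map ((·.1) ∘ fun p => if p.1 == a then (a, vs ++ [v]) else p)) =
          dG.items.map (·.1) := by
        refine List.map_congr_left (fun p hp => ?_)
        by_cases hpa : (p.1 == a) = true
        · have hpa' : p.1 = a := by simpa using hpa
          simp [Function.comp, hpa']
        · simp [Function.comp, hpa]
      rw [this]; exact hnd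
    · rw [hGitems]
      intro p hp
      obtain ⟨q, hq, rfl⟩ := List.mem_map.1 hp
      by_cases hpa : (q.1 == a) = true
      · simp [hpa]
      · simpa [hpa] using hne q hq
  · -- fresh key: both sides append a new entry
    have hcA : dA.contains a = false := by
      have := pv_contains_rel dA dG h a
      simp only [Bool.not_eq_true] at hc ⊢
      rw [this]; simpa using hc
    have hDG : dG.getD a [] = [] := PySem.Dict.getD_of_not_contains dG [] (by simpa using hc)
    rw [if_neg (by simp [hcA]), hDG,
      PySem.Dict.items_insert_of_not_contains dA v hcA,
      PySem.Dict.items_insert_of_not_contains dG ([] ++ [v]) (by simpa using hc)]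
    refine ⟨by simp [h, pvProj, pv_maxD_singleton], ?_, ?_⟩
    · simp only [List.map_append, List.map_cons, List.map_nil]
      refine List.Nodup.append hnd (List.nodup_singleton a) ?_
      intro x hx hy
      simp only [List.mem_singleton] at hy
      rw [hy] at hx
      exact pv_not_mem_keys_of_not_contains dG a (by simpa using hc) hx
    · intro p hp
      rcases List.mem_append.1 hp with h1 | h1
      · exact hne p h1
      · simp only [List.mem_singleton] at h1; subst h1; simp

-- the loop invariant: A's dict is the per-group maximum image of B's group dict
theorem pv_loop_inv (l : List (List (String × String)))
    (dA : PySem.Dict String String) (dG : PySem.Dict String (List String))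
    (h : dA.items = dG.items.map pvProj)
    (hnd : (dG.items.map (·.1)).Nodup)
    (hne : ∀ p ∈ dG.items, p.2 ≠ ([] : List String)) :
    (l.foldl pvStepA dA).items = ((l.foldl pvStepB dG).items).map pvProj := by
  induction l generalizing dA dG with
  | nil => simpa using h
  | cons assembly t ih =>
      simp only [List.foldl_cons]
      have hs := pv_step dA dG (((PySem.Dict.mk assembly).get? "accession").getD "")
        (((PySem.Dict.mk assembly).get? "version").getD "") h hnd hne
      simp only at hs
      exact ih _ _ hs.1 hs.2.1 hs.2.2

-- ===== VERDICT (by name: the statement is the Claim_ definition above) =====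
theorem create_acc_version_dict_spec : Claim_equal_create_acc_version_dict := by
  intro json_data _ _
  unfold Spec_create_acc_version_dict create_acc_version_dict create_acc_version_dict_alt
  exact pv_loop_inv json_data PySem.Dict.empty PySem.Dict.empty rfl (by simp [PySem.Dict.empty]) (by simp [PySem.Dict.empty])
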